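-- pv_equiv track=rewrite | github.com/Nangniya/Algorithm | 프로그래머스/3/92344. 파괴되지 않은 건물/파괴되지 않은 건물.py | solution
-- ===== SOURCE A (Python) =====
-- def solution(board, skill):
--     N, M = len(board), len(board[0])
--     dp = [[0] * M for _ in range(N)]
--     answer = 0
--
--     for t, r1, c1, r2, c2, degree in skill:
--         d = -degree if t == 1 else degree
--         dp[r1][c1] += d
--         if r2 + 1 < N:
--             dp[r2 + 1][c1] -= d
--         if c2 + 1 < M:
--             dp[r1][c2 + 1] -= d
--         if r2 + 1 < N and c2 + 1 < M:
--             dp[r2 + 1][c2 + 1] += d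
--
--     for i in range(N):
--         for j in range(M):
--             top = dp[i - 1][j] if i > 0 else 0
--             left = dp[i][j - 1] if j > 0 else 0
--             intersection = dp[i - 1][j - 1] if i > 0 and j > 0 else 0
--             dp[i][j] += top + left - intersection
--
--             if dp[i][j] + board[i][j] > 0:
--                 answer += 1
--
--     return answer
-- ===== SOURCE B (Python) =====
-- def solution(board, skill):
--     N, M = len(board), len(board[0])
--     answer = 0
--     for i in range(N):
--         for j in range(M):
--             v = board[i][j]
--             for t, r1, c1, r2, c2, degree in skill:
--                 if r1 <= i <= r2 and c1 <= j <= c2: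
--                     v += -degree if t == 1 else degree
--             if v > 0:
--                 answer += 1
--     return answer
-- ===== Notes on version B (the rewrite author's own statement) =====
-- stated objective: simpler
-- what changed: B abandons the 2D difference-array/prefix-sum machinery entirely: for every cell it directly sums the degrees of the skills whose rectangle contains that cell and tests positivity, a three-line brute-force pass with no auxiliary grid.
-- outside the precondition, e.g. on solution([[2, 1, -2], [0, -2, -1], [-2, -1, 2]], [[0, -1, -1, 0, -1, 3]]): A returns 5, B returns 3; on solution([[1, 1], [1, 1], [1, 1]], [[0, 2, 0, 0, 1, 1]]): A returns 4, B returns 6; on solution([[1]], [[0, 1, 0, 1, 0, 2]]): A raises IndexError, B returns 1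
import Mathlib
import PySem

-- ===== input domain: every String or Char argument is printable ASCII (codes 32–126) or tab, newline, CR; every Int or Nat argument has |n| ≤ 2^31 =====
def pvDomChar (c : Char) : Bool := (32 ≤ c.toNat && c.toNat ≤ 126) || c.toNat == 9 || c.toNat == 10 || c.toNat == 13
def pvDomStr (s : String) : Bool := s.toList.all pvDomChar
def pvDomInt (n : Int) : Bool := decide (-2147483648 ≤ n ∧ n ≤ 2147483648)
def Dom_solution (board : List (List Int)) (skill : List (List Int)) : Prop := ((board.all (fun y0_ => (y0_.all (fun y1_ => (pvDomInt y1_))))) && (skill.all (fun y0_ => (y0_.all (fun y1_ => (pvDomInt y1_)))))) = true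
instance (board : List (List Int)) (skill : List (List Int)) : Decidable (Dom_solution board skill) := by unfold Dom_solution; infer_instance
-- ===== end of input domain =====

-- B drops A's difference-array/prefix-sum machinery: it sums, per cell, the degrees of the
-- skills whose rectangle contains the cell and counts the positive cells (simpler, but O(N*M*K)).

-- shared grid helpers (transliterations of `g[i][j]` and `g[i][j] += d` on an in-range cell)
def gget (g : List (List Int)) (i j : Nat) : Int := (g.getD i []).getD j 0
def gadd (g : List (List Int)) (i j : Nat) (d : Int) : List (List Int) :=
  g.modify i (fun row => row.modify j (fun v => v + d))
def zeros (n m : Nat) : List (List Int) := List.replicate n (List.replicate m 0)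

-- Python list-index resolution for A's writes (negative indices wrap; exact where the
-- resolved index is in range, i.e. wherever Python does not raise IndexError)
def pyIdx (len : Nat) (i : Int) : Nat := (if i < 0 then i + (len : Int) else i).toNat
def gaddI (g : List (List Int)) (i j : Int) (d : Int) : List (List Int) :=
  g.modify (pyIdx g.length i) (fun row => row.modify (pyIdx row.length j) (fun v => v + d))

-- ===== PORT A =====
def stepA (N M : Nat) (g : List (List Int)) (s : List Int) : List (List Int) :=
  let t := s.getD 0 0
  let r1 := s.getD 1 0
  let c1 := s.getD 2 0
  let r2 := s.getD 3 0
  let c2 := s.getD 4 0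
  let degree := s.getD 5 0
  let d := if t = 1 then -degree else degree
  let g1 := gaddI g r1 c1 d
  let g2 := if r2 + 1 < (N : Int) then gaddI g1 (r2 + 1) c1 (-d) else g1
  let g3 := if c2 + 1 < (M : Int) then gaddI g2 r1 (c2 + 1) (-d) else g2
  if r2 + 1 < (N : Int) ∧ c2 + 1 < (M : Int) then gaddI g3 (r2 + 1) (c2 + 1) d else g3

def solution (board : List (List Int)) (skill : List (List Int)) : Int :=
  let N := board.length
  let M := (board.getD 0 []).length
  let dp0 := skill.foldl (stepA N M) (zeros N M)
  let res := (List.range N).foldl (fun (st : List (List Int) × Int) i =>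
    (List.range M).foldl (fun (st : List (List Int) × Int) j =>
      let dp := st.1
      let top := if 0 < i then gget dp (i - 1) j else 0
      let left := if 0 < j then gget dp i (j - 1) else 0
      let inter := if 0 < i ∧ 0 < j then gget dp (i - 1) (j - 1) else 0
      let dp' := gadd dp i j (top + left - inter)
      (dp', if gget dp' i j + gget board i j > 0 then st.2 + 1 else st.2)) st) (dp0, 0)
  res.2

-- ===== PORT B =====
-- the value of cell (i, j): board[i][j] plus the signed degree of every covering skill
def cellVal (board skill : List (List Int)) (i j : Nat) : Int :=
  skill.foldl (fun v s =>
    let t := s.getD 0 0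
    let r1 := s.getD 1 0
    let c1 := s.getD 2 0
    let r2 := s.getD 3 0
    let c2 := s.getD 4 0
    let degree := s.getD 5 0
    if r1 ≤ (i : Int) ∧ (i : Int) ≤ r2 ∧ c1 ≤ (j : Int) ∧ (j : Int) ≤ c2 then
      v + (if t = 1 then -degree else degree)
    else v) (gget board i j)

def solution_alt (board : List (List Int)) (skill : List (List Int)) : Int :=
  let N := board.length
  let M := (board.getD 0 []).length
  (List.range N).foldl (fun answer i =>
    (List.range M).foldl (fun answer j =>
      if cellVal board skill i j > 0 then answer + 1 else answer) answer) 0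

-- ===== PRECONDITION & SPEC =====
-- Pre_ restricts to the natural domain of the problem: a nonempty board whose rows all have at
-- least len(board[0]) cells, and skills [t,r1,c1,r2,c2,degree] describing a genuine rectangle
-- (r1 ≤ r2, c1 ≤ c2) inside the N x M grid.  Outside it A raises (unpacking error, or
-- IndexError on a short row or an out-of-range coordinate) or, for negative or inverted
-- coordinates, returns a value that depends on Python's negative-index wraparound or on the
-- accidental region the four difference-array updates paint — artefacts of A's implementation
-- on inputs the problem statement never supplies.
def Pre_solution (board : List (List Int)) (skill : List (List Int)) : Prop :=
  board ≠ [] ∧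
  (∀ row ∈ board, (board.getD 0 []).length ≤ row.length) ∧
  ∀ s ∈ skill, s.length = 6 ∧
    0 ≤ s.getD 1 0 ∧ s.getD 1 0 ≤ s.getD 3 0 ∧ s.getD 3 0 < (board.length : Int) ∧
    0 ≤ s.getD 2 0 ∧ s.getD 2 0 ≤ s.getD 4 0 ∧ s.getD 4 0 < ((board.getD 0 []).length : Int)
instance (board : List (List Int)) (skill : List (List Int)) : Decidable (Pre_solution board skill) := by
  unfold Pre_solution; infer_instance

def pvWitness_solution : List (List Int) × List (List Int) :=
  ([[1, 0], [0, -2]], [[1, 0, 0, 1, 1, 1], [0, 0, 0, 0, 1, 3]])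

def Spec_solution (board : List (List Int)) (skill : List (List Int)) (out : Int) : Prop := out = solution_alt board skill
instance (board : List (List Int)) (skill : List (List Int)) (out : Int) : Decidable (Spec_solution board skill out) := by unfold Spec_solution; infer_instance

-- ===== CLAIM (what is proved, stated in full; the proofs are below) =====
def Claim_equal_solution : Prop := ∀ (board : List (List Int)) (skill : List (List Int)), Dom_solution board skill → Pre_solution board skill → Spec_solution board skill (solution board skill)

-- ===== LEMMAS AND PROOFS =====

def Rect (g : List (List Int)) (n m : Nat) : Prop :=
  g.length = n ∧ ∀ row ∈ g, row.length = m

lemma rect_zeros (n m : Nat) : Rect (zeros n m) n m := by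
  constructor
  · simp [zeros]
  · intro row hrow
    simp [zeros] at hrow
    simp [hrow.2]

lemma gget_zeros (n m a b : Nat) : gget (zeros n m) a b = 0 := by
  unfold gget zeros
  have h1 : (List.replicate n (List.replicate m 0)).getD a [] =
      if a < n then List.replicate m (0 : Int) else [] := by
    rw [List.getD_eq_getElem?_getD, List.getElem?_replicate]
    split <;> simp
  rw [h1]
  split
  · rw [List.getD_eq_getElem?_getD, List.getElem?_replicate]
    split <;> simp
  · simp [List.getD]

lemma mem_modify_rows (g : List (List Int)) (i : Nat) (f : List Int → List Int)
    (row : List Int) (h : row ∈ g.modify i f) :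
    row ∈ g ∨ ∃ r ∈ g, row = f r := by
  rcases List.mem_iff_getElem?.mp h with ⟨k, hk⟩
  rw [List.getElem?_modify] at hk
  cases hg : g[k]? with
  | none => rw [hg] at hk; simp at hk
  | some r =>
    have hr : r ∈ g := List.mem_iff_getElem?.mpr ⟨k, hg⟩
    rw [hg] at hk
    simp at hk
    by_cases hik : i = k
    · right; exact ⟨r, hr, by rw [← hk, if_pos hik]⟩
    · left; rw [← hk, if_neg hik]; exact hr

lemma rect_gadd (g : List (List Int)) (n m i j : Nat) (d : Int) (h : Rect g n m) :
    Rect (gadd g i j d) n m := by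
  obtain ⟨hlen, hrow⟩ := h
  refine ⟨by simpa [gadd, List.length_modify] using hlen, ?_⟩
  intro row hmem
  rcases mem_modify_rows g i _ row hmem with hm | ⟨r, hr, rfl⟩
  · exact hrow row hm
  · simpa [List.length_modify] using hrow r hr

lemma modify_getD_add (r : List Int) (j b : Nat) (d : Int) (hj : j < r.length) :
    (r.modify j (fun v => v + d)).getD b 0 = r.getD b 0 + (if b = j then d else 0) := by
  rw [List.getD_eq_getElem?_getD, List.getD_eq_getElem?_getD, List.getElem?_modify]
  by_cases hbj : b = j
  · subst hbj
    rw [List.getElem?_eq_getElem hj]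
    simp
  · have hjb : ¬ (j = b) := fun hh => hbj hh.symm
    simp [hjb, hbj]

lemma gget_gadd (g : List (List Int)) (n m i j a b : Nat) (d : Int)
    (h : Rect g n m) (hi : i < n) (hj : j < m) :
    gget (gadd g i j d) a b = gget g a b + (if a = i ∧ b = j then d else 0) := by
  obtain ⟨hlen, hrow⟩ := h
  by_cases hai : a = i
  · subst hai
    have ha : a < g.length := by omega
    have hm : a < (g.modify a (fun row => row.modify j (fun v => v + d))).length := by
      simpa [List.length_modify] using ha
    have hrl : (g[a]'ha).length = m := hrow _ (List.getElem_mem ha)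
    unfold gget gadd
    rw [List.getD_eq_getElem _ _ hm, List.getD_eq_getElem _ _ ha, List.getElem_modify,
        if_pos rfl, modify_getD_add _ _ _ _ (by omega)]
    simp
  · unfold gget gadd
    have hia : ¬ (i = a) := fun hh => hai hh.symm
    rw [List.getD_eq_getElem?_getD (l := g.modify i _), List.getElem?_modify]
    cases hg : g[a]? <;> simp [hia, hai, List.getD_eq_getElem?_getD, hg]

lemma foldl_build {α : Type} (step : List (List Int) → α → List (List Int))
    (delta : α → Nat → Nat → Int) (n m : Nat) (l : List α)
    (hstep : ∀ g s, s ∈ l → Rect g n m → Rect (step g s) n m ∧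
      ∀ a b, a < n → b < m → gget (step g s) a b = gget g a b + delta s a b) :
    ∀ g, Rect g n m → Rect (l.foldl step g) n m ∧
      ∀ a b, a < n → b < m →
        gget (l.foldl step g) a b = gget g a b + (l.map (fun s => delta s a b)).sum := by
  induction l with
  | nil => intro g hg; exact ⟨hg, fun a b _ _ => by simp⟩
  | cons s t ih =>
    intro g hg
    have hs := hstep g s (by simp) hg
    have ih' := ih (fun g' s' hs' hg' => hstep g' s' (by simp [hs']) hg') (step g s) hs.1
    refine ⟨ih'.1, ?_⟩
    intro a b ha hb
    rw [List.foldl_cons] at *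
    rw [ih'.2 a b ha hb, hs.2 a b ha hb]
    simp [add_assoc]

-- the per-cell contribution of one skill row in A's difference grid
def deltaA (N M : Nat) (r1 c1 r2 c2 d : Int) (a b : Nat) : Int :=
  (if (a : Int) = r1 ∧ (b : Int) = c1 then d else 0) +
  (if r2 + 1 < (N : Int) ∧ (a : Int) = r2 + 1 ∧ (b : Int) = c1 then -d else 0) +
  (if c2 + 1 < (M : Int) ∧ (a : Int) = r1 ∧ (b : Int) = c2 + 1 then -d else 0) +
  (if r2 + 1 < (N : Int) ∧ c2 + 1 < (M : Int) ∧ (a : Int) = r2 + 1 ∧ (b : Int) = c2 + 1 then d else 0)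

def dOf (s : List Int) : Int := if s.getD 0 0 = 1 then -(s.getD 5 0) else s.getD 5 0

def OkSkill (N M : Nat) (s : List Int) : Prop :=
  0 ≤ s.getD 1 0 ∧ s.getD 1 0 ≤ s.getD 3 0 ∧ s.getD 3 0 < (N : Int) ∧
  0 ≤ s.getD 2 0 ∧ s.getD 2 0 ≤ s.getD 4 0 ∧ s.getD 4 0 < (M : Int)

lemma if_coord (a b : Nat) (p q d : Int) (hp : 0 ≤ p) (hq : 0 ≤ q) :
    (if a = p.toNat ∧ b = q.toNat then d else 0) = (if (a : Int) = p ∧ (b : Int) = q then d else 0) := by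
  have h : (a = p.toNat ∧ b = q.toNat) ↔ ((a : Int) = p ∧ (b : Int) = q) := by omega
  rw [if_congr h rfl rfl]

lemma gaddI_nonneg (g : List (List Int)) (i j d : Int) (hi : 0 ≤ i) (hj : 0 ≤ j) :
    gaddI g i j d = gadd g i.toNat j.toNat d := by
  unfold gaddI gadd pyIdx
  rw [if_neg (by omega : ¬ i < 0)]
  congr 1
  funext row
  rw [if_neg (by omega : ¬ j < 0)]

lemma rect_gaddI (g : List (List Int)) (n m : Nat) (i j : Int) (d : Int)
    (h : Rect g n m) (hi0 : 0 ≤ i) (hj0 : 0 ≤ j) : Rect (gaddI g i j d) n m := by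
  rw [gaddI_nonneg _ _ _ _ hi0 hj0]
  exact rect_gadd _ _ _ _ _ _ h

lemma gget_gaddI (g : List (List Int)) (n m : Nat) (i j : Int) (a b : Nat) (d : Int)
    (h : Rect g n m) (hi0 : 0 ≤ i) (hj0 : 0 ≤ j) (hi : i.toNat < n) (hj : j.toNat < m) :
    gget (gaddI g i j d) a b = gget g a b + (if (a : Int) = i ∧ (b : Int) = j then d else 0) := by
  rw [gaddI_nonneg _ _ _ _ hi0 hj0, gget_gadd g n m _ _ a b d h hi hj,
    if_coord a b i j d hi0 hj0]

set_option maxHeartbeats 2000000 in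
lemma stepA_eval (N M : Nat) (g : List (List Int)) (s : List Int)
    (hs : OkSkill N M s) (hg : Rect g N M) :
    Rect (stepA N M g s) N M ∧
    ∀ a b, a < N → b < M → gget (stepA N M g s) a b =
      gget g a b + deltaA N M (s.getD 1 0) (s.getD 2 0) (s.getD 3 0) (s.getD 4 0) (dOf s) a b := by
  obtain ⟨h1, h2, h4, h5, h6, h8⟩ := hs
  have hb1 : (s.getD 1 0).toNat < N := by omega
  have hb2 : (s.getD 2 0).toNat < M := by omega
  have R0 := hg
  by_cases gN : s.getD 3 0 + 1 < (N : Int)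
  · by_cases gM : s.getD 4 0 + 1 < (M : Int)
    · have hbN : (s.getD 3 0 + 1).toNat < N := by omega
      have hbM : (s.getD 4 0 + 1).toNat < M := by omega
      simp only [stepA, dOf, deltaA, gN, gM, true_and, and_true, if_true]
      set d := (if s.getD 0 0 = 1 then -s.getD 5 0 else s.getD 5 0) with hd
      set g1 := gaddI g (s.getD 1 0) (s.getD 2 0) d with hg1
      set g2 := gaddI g1 (s.getD 3 0 + 1) (s.getD 2 0) (-d) with hg2
      set g3 := gaddI g2 (s.getD 1 0) (s.getD 4 0 + 1) (-d) with hg3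
      have R1 : Rect g1 N M := rect_gaddI _ _ _ _ _ _ R0 (by omega) (by omega)
      have R2 : Rect g2 N M := rect_gaddI _ _ _ _ _ _ R1 (by omega) (by omega)
      have R3 : Rect g3 N M := rect_gaddI _ _ _ _ _ _ R2 (by omega) (by omega)
      refine ⟨rect_gaddI _ _ _ _ _ _ R3 (by omega) (by omega), ?_⟩
      intro a b ha hb
      rw [gget_gaddI g3 N M _ _ a b _ R3 (by omega) (by omega) hbN hbM, hg3,
          gget_gaddI g2 N M _ _ a b _ R2 (by omega) (by omega) hb1 hbM, hg2,
          gget_gaddI g1 N M _ _ a b _ R1 (by omega) (by omega) hbN hb2, hg1,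
          gget_gaddI g N M _ _ a b _ R0 (by omega) (by omega) hb1 hb2]
      ring
    · have hbN : (s.getD 3 0 + 1).toNat < N := by omega
      simp only [stepA, dOf, deltaA, gN, gM, true_and, false_and, if_true, if_false]
      set d := (if s.getD 0 0 = 1 then -s.getD 5 0 else s.getD 5 0) with hd
      set g1 := gaddI g (s.getD 1 0) (s.getD 2 0) d with hg1
      have R1 : Rect g1 N M := rect_gaddI _ _ _ _ _ _ R0 (by omega) (by omega)
      refine ⟨rect_gaddI _ _ _ _ _ _ R1 (by omega) (by omega), ?_⟩
      intro a b ha hb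
      rw [gget_gaddI g1 N M _ _ a b _ R1 (by omega) (by omega) hbN hb2, hg1,
          gget_gaddI g N M _ _ a b _ R0 (by omega) (by omega) hb1 hb2]
      ring
  · by_cases gM : s.getD 4 0 + 1 < (M : Int)
    · have hbM : (s.getD 4 0 + 1).toNat < M := by omega
      simp only [stepA, dOf, deltaA, gN, gM, true_and, false_and, if_true, if_false]
      set d := (if s.getD 0 0 = 1 then -s.getD 5 0 else s.getD 5 0) with hd
      set g1 := gaddI g (s.getD 1 0) (s.getD 2 0) d with hg1
      have R1 : Rect g1 N M := rect_gaddI _ _ _ _ _ _ R0 (by omega) (by omega)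
      refine ⟨rect_gaddI _ _ _ _ _ _ R1 (by omega) (by omega), ?_⟩
      intro a b ha hb
      rw [gget_gaddI g1 N M _ _ a b _ R1 (by omega) (by omega) hb1 hbM, hg1,
          gget_gaddI g N M _ _ a b _ R0 (by omega) (by omega) hb1 hb2]
      ring
    · simp only [stepA, dOf, deltaA, gN, gM, false_and, if_false]
      refine ⟨rect_gaddI _ _ _ _ _ _ R0 (by omega) (by omega), ?_⟩
      intro a b ha hb
      rw [gget_gaddI g N M _ _ a b _ R0 (by omega) (by omega) hb1 hb2]
      ring

-- 2D partial sums
def S (f : Nat → Nat → Int) (i j : Nat) : Int :=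
  ∑ x ∈ Finset.range i, ∑ y ∈ Finset.range j, f x y

lemma S_zero_left (f : Nat → Nat → Int) (j : Nat) : S f 0 j = 0 := by simp [S]

lemma S_zero_right (f : Nat → Nat → Int) (i : Nat) : S f i 0 = 0 := by simp [S]

lemma S_succ_left (f : Nat → Nat → Int) (i j : Nat) :
    S f (i + 1) j = S f i j + ∑ y ∈ Finset.range j, f i y := by
  simp [S, Finset.sum_range_succ]

lemma S_succ_succ (f : Nat → Nat → Int) (i j : Nat) :
    S f (i + 1) (j + 1) = f i j + S f i (j + 1) + S f (i + 1) j - S f i j := by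
  rw [S_succ_left, S_succ_left, Finset.sum_range_succ]
  ring

lemma S_rec_guarded (f : Nat → Nat → Int) (i j : Nat) :
    S f (i + 1) (j + 1) = f i j + (if 0 < i then S f i (j + 1) else 0) +
      (if 0 < j then S f (i + 1) j else 0) - (if 0 < i ∧ 0 < j then S f i j else 0) := by
  rw [S_succ_succ]
  rcases Nat.eq_zero_or_pos i with hi | hi <;> rcases Nat.eq_zero_or_pos j with hj | hj <;>
    simp [hi, hj, S_zero_left, S_zero_right]

lemma S_add (f g : Nat → Nat → Int) (i j : Nat) :
    S (fun a b => f a b + g a b) i j = S f i j + S g i j := by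
  simp [S, Finset.sum_add_distrib]

lemma S_map_sum {α : Type} (l : List α) (δ : α → Nat → Nat → Int) (i j : Nat) :
    S (fun a b => (l.map (fun s => δ s a b)).sum) i j = (l.map (fun s => S (δ s) i j)).sum := by
  induction l with
  | nil => simp [S]
  | cons s t ih =>
    simp only [List.map_cons, List.sum_cons]
    rw [← ih, ← S_add]

lemma sum_point1 (n : Nat) (p c : Int) :
    (∑ x ∈ Finset.range n, if (x : Int) = p then c else 0) =
      if 0 ≤ p ∧ p < (n : Int) then c else 0 := by
  induction n with
  | zero =>
    simp
  | succ k ih =>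
    rw [Finset.sum_range_succ, ih]
    split_ifs <;> push_cast at * <;> omega

lemma sum_point2 (n m : Nat) (p q c : Int) :
    (∑ x ∈ Finset.range n, ∑ y ∈ Finset.range m, if (x : Int) = p ∧ (y : Int) = q then c else 0) =
      if 0 ≤ p ∧ p < (n : Int) ∧ 0 ≤ q ∧ q < (m : Int) then c else 0 := by
  have inner : ∀ x : Nat, (∑ y ∈ Finset.range m, if (x : Int) = p ∧ (y : Int) = q then c else 0) =
      if (x : Int) = p then (if 0 ≤ q ∧ q < (m : Int) then c else 0) else 0 := by
    intro x
    by_cases hx : (x : Int) = p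
    · simp only [hx, true_and]
      exact sum_point1 m q c
    · simp [hx]
  simp only [inner]
  rw [sum_point1]
  split_ifs <;> omega

-- the prefix sum of one skill's difference-grid contribution is its rectangle indicator
set_option maxHeartbeats 1000000 in
lemma skill_ind (N M i j : Nat) (r1 c1 r2 c2 d : Int) (hi : i < N) (hj : j < M)
    (h1 : 0 ≤ r1) (h2 : r1 ≤ r2) (h4 : r2 < (N : Int))
    (h5 : 0 ≤ c1) (h6 : c1 ≤ c2) (h8 : c2 < (M : Int)) :
    S (deltaA N M r1 c1 r2 c2 d) (i + 1) (j + 1) =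
      if r1 ≤ (i : Int) ∧ (i : Int) ≤ r2 ∧ c1 ≤ (j : Int) ∧ (j : Int) ≤ c2 then d else 0 := by
  by_cases gN : r2 + 1 < (N : Int) <;> by_cases gM : c2 + 1 < (M : Int) <;>
    simp only [deltaA, S, gN, gM, true_and, false_and, and_false, if_false,
      Finset.sum_add_distrib, sum_point2, add_zero] <;>
    split_ifs <;> omega

-- the common counting pass
def cnt (N M : Nat) (F : Nat → Nat → Int) : Int :=
  (List.range N).foldl (fun a i =>
    (List.range M).foldl (fun a j => if F i j > 0 then a + 1 else a) a) 0

lemma cntrow_congr (M : Nat) (F G : Nat → Int) (h : ∀ j, j < M → F j = G j) (a : Int) :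
    (List.range M).foldl (fun a j => if F j > 0 then a + 1 else a) a =
    (List.range M).foldl (fun a j => if G j > 0 then a + 1 else a) a := by
  induction M generalizing a with
  | zero => rfl
  | succ m ih =>
    rw [List.range_succ, List.foldl_append, List.foldl_append]
    simp only [List.foldl_cons, List.foldl_nil]
    rw [ih (fun j hj => h j (by omega)) a, h m (by omega)]

lemma cnt_congr (N M : Nat) (F G : Nat → Nat → Int)
    (h : ∀ i j, i < N → j < M → F i j = G i j) : cnt N M F = cnt N M G := by
  unfold cnt
  induction N with
  | zero => rfl
  | succ n ih =>
    rw [List.range_succ, List.foldl_append, List.foldl_append]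
    simp only [List.foldl_cons, List.foldl_nil]
    rw [ih (fun i j hi hj => h i j (by omega) hj),
        cntrow_congr M (fun j => F n j) (fun j => G n j) (fun j hj => h n j (by omega) hj)]

-- A's fused pass, one cell step (proof-side name for the loop body of `solution`)
def innerF (board : List (List Int)) (i : Nat) (st : List (List Int) × Int) (j : Nat) :
    List (List Int) × Int :=
  let dp := st.1
  let top := if 0 < i then gget dp (i - 1) j else 0
  let left := if 0 < j then gget dp i (j - 1) else 0
  let inter := if 0 < i ∧ 0 < j then gget dp (i - 1) (j - 1) else 0
  let dp' := gadd dp i j (top + left - inter)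
  (dp', if gget dp' i j + gget board i j > 0 then st.2 + 1 else st.2)

lemma fusedA_inner (board : List (List Int)) (N M : Nat) (f : Nat → Nat → Int)
    (i : Nat) (hi : i < N) (jn : Nat) (hjn : jn ≤ M) (dp : List (List Int)) (ans : Int)
    (hrect : Rect dp N M)
    (hdp : ∀ a b, a < N → b < M → gget dp a b = if a < i then S f (a + 1) (b + 1) else f a b) :
    Rect ((List.range jn).foldl (innerF board i) (dp, ans)).1 N M ∧
    (∀ a b, a < N → b < M →
      gget ((List.range jn).foldl (innerF board i) (dp, ans)).1 a b =
        if a < i ∨ (a = i ∧ b < jn) then S f (a + 1) (b + 1) else f a b) ∧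
    ((List.range jn).foldl (innerF board i) (dp, ans)).2 =
      (List.range jn).foldl
        (fun acc y => if S f (i + 1) (y + 1) + gget board i y > 0 then acc + 1 else acc) ans := by
  induction jn with
  | zero =>
    simp only [List.range_zero, List.foldl_nil]
    refine ⟨hrect, ?_, by trivial⟩
    intro a b ha hb
    rw [hdp a b ha hb]
    have hc : (a < i ∨ (a = i ∧ b < 0)) ↔ a < i := by omega
    rw [if_congr hc rfl rfl]
  | succ j ih =>
    have hj : j < M := by omega
    obtain ⟨R1, H1, A1⟩ := ih (by omega)
    rw [List.range_succ, List.foldl_append, List.foldl_append]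
    simp only [List.foldl_cons, List.foldl_nil]
    set st := (List.range j).foldl (innerF board i) (dp, ans) with hst
    have htop : (if 0 < i then gget st.1 (i - 1) j else 0) = if 0 < i then S f i (j + 1) else 0 := by
      by_cases h0 : 0 < i
      · rw [if_pos h0, if_pos h0, H1 (i - 1) j (by omega) hj,
          if_pos (by omega : i - 1 < i ∨ (i - 1 = i ∧ j < j))]
        congr 1
        omega
      · rw [if_neg h0, if_neg h0]
    have hleft : (if 0 < j then gget st.1 i (j - 1) else 0) = if 0 < j then S f (i + 1) j else 0 := by
      by_cases h0 : 0 < j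
      · rw [if_pos h0, if_pos h0, H1 i (j - 1) hi (by omega),
          if_pos (by omega : i < i ∨ (i = i ∧ j - 1 < j))]
        congr 1
        omega
      · rw [if_neg h0, if_neg h0]
    have hinter : (if 0 < i ∧ 0 < j then gget st.1 (i - 1) (j - 1) else 0)
        = if 0 < i ∧ 0 < j then S f i j else 0 := by
      by_cases h0 : 0 < i ∧ 0 < j
      · rw [if_pos h0, if_pos h0, H1 (i - 1) (j - 1) (by omega) (by omega),
          if_pos (by omega : i - 1 < i ∨ (i - 1 = i ∧ j - 1 < j))]
        congr 1 <;> omega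
      · rw [if_neg h0, if_neg h0]
    have hcur : gget st.1 i j = f i j := by
      rw [H1 i j hi hj, if_neg (by omega : ¬ (i < i ∨ (i = i ∧ j < j)))]
    simp only [innerF]
    rw [htop, hleft, hinter]
    set v := (if 0 < i then S f i (j + 1) else 0) + (if 0 < j then S f (i + 1) j else 0)
      - (if 0 < i ∧ 0 < j then S f i j else 0) with hv
    have hnew : gget (gadd st.1 i j v) i j = S f (i + 1) (j + 1) := by
      rw [gget_gadd st.1 N M i j i j v R1 hi hj, if_pos ⟨rfl, rfl⟩, hcur, hv,
        S_rec_guarded f i j]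
      ring
    refine ⟨rect_gadd _ _ _ _ _ _ R1, ?_, ?_⟩
    · intro a b ha hb
      rw [gget_gadd st.1 N M i j a b v R1 hi hj]
      by_cases hab : a = i ∧ b = j
      · obtain ⟨rfl, rfl⟩ := hab
        rw [if_pos ⟨rfl, rfl⟩, hcur, if_pos (by omega : a < a ∨ (a = a ∧ b < b + 1)), hv,
          S_rec_guarded f a b]
        ring
      · rw [if_neg hab, add_zero, H1 a b ha hb,
          if_congr (by omega : (a < i ∨ (a = i ∧ b < j)) ↔ (a < i ∨ (a = i ∧ b < j + 1))) rfl rfl]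
    · rw [hnew, A1]

lemma fusedA_outer (board : List (List Int)) (N M : Nat) (f : Nat → Nat → Int)
    (k : Nat) (hk : k ≤ N) (dp : List (List Int))
    (hrect : Rect dp N M)
    (hdp : ∀ a b, a < N → b < M → gget dp a b = f a b) :
    Rect ((List.range k).foldl (fun st i => (List.range M).foldl (innerF board i) st) (dp, 0)).1 N M ∧
    (∀ a b, a < N → b < M →
      gget ((List.range k).foldl (fun st i => (List.range M).foldl (innerF board i) st) (dp, 0)).1 a b =
        if a < k then S f (a + 1) (b + 1) else f a b) ∧
    ((List.range k).foldl (fun st i => (List.range M).foldl (innerF board i) st) (dp, 0)).2 =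
      (List.range k).foldl (fun acc x =>
        (List.range M).foldl
          (fun acc y => if S f (x + 1) (y + 1) + gget board x y > 0 then acc + 1 else acc) acc) 0 := by
  induction k with
  | zero =>
    simp only [List.range_zero, List.foldl_nil]
    refine ⟨hrect, ?_, by trivial⟩
    intro a b ha hb
    rw [hdp a b ha hb, if_neg (by omega : ¬ a < 0)]
  | succ n ih =>
    have hn : n < N := by omega
    obtain ⟨R1, H1, A1⟩ := ih (by omega)
    rw [List.range_succ, List.foldl_append, List.foldl_append]
    simp only [List.foldl_cons, List.foldl_nil]
    set st := (List.range n).foldl (fun st i => (List.range M).foldl (innerF board i) st) (dp, 0)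
      with hst
    have hin := fusedA_inner board N M f n hn M (le_refl M) st.1 st.2 R1
      (fun a b ha hb => H1 a b ha hb)
    obtain ⟨R2, H2, A2⟩ := hin
    refine ⟨R2, ?_, ?_⟩
    · intro a b ha hb
      rw [H2 a b ha hb,
        if_congr (by omega : (a < n ∨ (a = n ∧ b < M)) ↔ a < n + 1) rfl rfl]
    · rw [A2, A1]

-- B's per-cell accumulation is the base value plus the sum of the covering skills' degrees
lemma cellVal_eq (board skill : List (List Int)) (i j : Nat) :
    cellVal board skill i j = gget board i j +
      (skill.map (fun s =>
        if s.getD 1 0 ≤ (i : Int) ∧ (i : Int) ≤ s.getD 3 0 ∧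
           s.getD 2 0 ≤ (j : Int) ∧ (j : Int) ≤ s.getD 4 0 then dOf s else 0)).sum := by
  unfold cellVal
  generalize gget board i j = v
  induction skill generalizing v with
  | nil => simp
  | cons s t ih =>
    simp only [List.foldl_cons, List.map_cons, List.sum_cons]
    rw [ih]
    unfold dOf
    split_ifs <;> ring

-- ===== VERDICT (by name: the statement is the Claim_ definition above) =====
theorem solution_spec : Claim_equal_solution := by
  intro board skill _ hpre
  unfold Spec_solution
  obtain ⟨hne, hrows, hsk⟩ := hpre
  set N := board.length with hN
  set M := (board.getD 0 []).length with hM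
  have hOk : ∀ s ∈ skill, OkSkill N M s := by
    intro s hs
    obtain ⟨_, p1, p2, p3, p4, p5, p6⟩ := hsk s hs
    exact ⟨p1, p2, p3, p4, p5, p6⟩
  -- A's difference grid
  have bA := foldl_build (stepA N M)
    (fun s a b => deltaA N M (s.getD 1 0) (s.getD 2 0) (s.getD 3 0) (s.getD 4 0) (dOf s) a b)
    N M skill (fun g s hs hg => stepA_eval N M g s (hOk s hs) hg) (zeros N M) (rect_zeros N M)
  have hdpA : ∀ a b, a < N → b < M →
      gget (skill.foldl (stepA N M) (zeros N M)) a b =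
      (skill.map (fun s =>
        deltaA N M (s.getD 1 0) (s.getD 2 0) (s.getD 3 0) (s.getD 4 0) (dOf s) a b)).sum := by
    intro a b ha hb
    rw [bA.2 a b ha hb, gget_zeros]
    ring
  have hA : solution board skill =
      cnt N M (fun i j => S (fun a b => (skill.map (fun s =>
        deltaA N M (s.getD 1 0) (s.getD 2 0) (s.getD 3 0) (s.getD 4 0) (dOf s) a b)).sum)
        (i + 1) (j + 1) + gget board i j) := by
    show ((List.range N).foldl (fun st i => (List.range M).foldl (innerF board i) st)
      (skill.foldl (stepA N M) (zeros N M), 0)).2 = _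
    exact (fusedA_outer board N M _ N (le_refl N) _ bA.1 hdpA).2.2
  -- B is the same count with the rectangle-indicator sums
  have hB : solution_alt board skill =
      cnt N M (fun i j => cellVal board skill i j) := rfl
  rw [hA, hB]
  apply cnt_congr
  intro i j hi hj
  rw [cellVal_eq, S_map_sum]
  have hmap : skill.map (fun s =>
      S (fun a b => deltaA N M (s.getD 1 0) (s.getD 2 0) (s.getD 3 0) (s.getD 4 0) (dOf s) a b)
        (i + 1) (j + 1)) =
      skill.map (fun s =>
        if s.getD 1 0 ≤ (i : Int) ∧ (i : Int) ≤ s.getD 3 0 ∧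
           s.getD 2 0 ≤ (j : Int) ∧ (j : Int) ≤ s.getD 4 0 then dOf s else 0) := by
    apply List.map_congr_left
    intro s hs
    obtain ⟨p1, p2, p3, p4, p5, p6⟩ := hOk s hs
    exact skill_ind N M i j _ _ _ _ (dOf s) hi hj p1 p2 p3 p4 p5 p6
  rw [hmap]
  ring
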